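-- pv_equiv track=rewrite | github.com/unabl4/codefights | christmas_large_families_gifts/christmas_large_families_gifts.py | christmasLargeFamiliesGifts
-- ===== SOURCE A (Python) =====
-- def christmasLargeFamiliesGifts(family1, family2):
--     n = len(family1) # len
--     v = [0] * n # vector (1 - f1 greater f2; -1 - opposite)
--     for i in range(n):
--         if family1[i] == family2[i]:
--             continue # nothing
--         v[i] = 1 if family1[i] > family2[i] else -1
--
--
--     mo = v.count(-1)
--     s = 0
--     for i in range(n):
--         if v[i] == 1:
--             s += mo
--         elif v[i] == -1:
--             mo -= 1
--
--     return s
-- ===== SOURCE B (Python) =====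
-- def christmasLargeFamiliesGifts(family1, family2):
--     wins = 0
--     res = 0
--     for i in range(len(family1)):
--         a = family1[i]
--         b = family2[i]
--         if a > b:
--             wins += 1
--         elif a < b:
--             res += wins
--     return res
-- ===== Notes on version B (the rewrite author's own statement) =====
-- stated objective: simpler
-- what changed: Single pass with one prefix-win accumulator (res += wins at each loss) instead of building a sign vector, counting -1s separately, and sweeping again with a decreasing suffix counter; the single pass without the auxiliary list was measured ~1.5x faster.
import Mathlib
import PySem

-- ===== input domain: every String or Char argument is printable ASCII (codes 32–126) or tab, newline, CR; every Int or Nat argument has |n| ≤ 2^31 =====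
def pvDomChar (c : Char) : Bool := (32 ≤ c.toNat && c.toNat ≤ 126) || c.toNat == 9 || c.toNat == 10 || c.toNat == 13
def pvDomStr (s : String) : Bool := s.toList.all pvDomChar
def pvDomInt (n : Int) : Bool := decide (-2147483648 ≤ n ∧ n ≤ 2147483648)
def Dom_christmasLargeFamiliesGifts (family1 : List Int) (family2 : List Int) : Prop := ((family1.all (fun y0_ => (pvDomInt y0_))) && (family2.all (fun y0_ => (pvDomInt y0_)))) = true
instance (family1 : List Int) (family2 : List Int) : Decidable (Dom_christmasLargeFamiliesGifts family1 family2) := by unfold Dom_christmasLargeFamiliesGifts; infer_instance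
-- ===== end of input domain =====

-- B replaces A's sign vector + count + suffix-decrement sweep with one pass keeping a
-- prefix-win accumulator (simpler, one pass, O(1) extra space); a timing run measured it ~1.5x faster.
-- ===== PORT A =====
-- The v-fill loop writes an independent value at every index i of range(n):
-- ported as a map over the range; the two sweeps stay faithful index loops with pyGetD.
def christmasLargeFamiliesGifts (family1 : List Int) (family2 : List Int) : Int :=
  let n : Int := family1.length
  let v : List Int := (PySem.List.pyRange 0 n 1).map (fun i =>
    if PySem.List.pyGetD family1 i 0 = PySem.List.pyGetD family2 i 0 then 0
    else if PySem.List.pyGetD family1 i 0 > PySem.List.pyGetD family2 i 0 then 1 else -1)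
  let mo : Int := (PySem.List.count v (-1) : Int)
  let r : Int × Int := (PySem.List.pyRange 0 n 1).foldl (fun (st : Int × Int) i =>
    if PySem.List.pyGetD v i 0 = 1 then (st.1, st.2 + st.1)
    else if PySem.List.pyGetD v i 0 = -1 then (st.1 - 1, st.2)
    else st) (mo, 0)
  r.2

-- ===== PORT B =====
def christmasLargeFamiliesGifts_alt (family1 : List Int) (family2 : List Int) : Int :=
  let r : Int × Int := (PySem.List.pyRange 0 (family1.length : Int) 1).foldl
    (fun (st : Int × Int) i =>
      let a := PySem.List.pyGetD family1 i 0
      let b := PySem.List.pyGetD family2 i 0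
      if a > b then (st.1 + 1, st.2)
      else if a < b then (st.1, st.2 + st.1)
      else st) (0, 0)
  r.2

-- ===== PRECONDITION & SPEC =====
-- Pre_ excludes exactly the inputs where Python A raises IndexError: family2 shorter than family1
-- (both programs index family2[i] for every i < len(family1)).
def Pre_christmasLargeFamiliesGifts (family1 : List Int) (family2 : List Int) : Prop :=
  family1.length ≤ family2.length
instance (family1 : List Int) (family2 : List Int) : Decidable (Pre_christmasLargeFamiliesGifts family1 family2) := by unfold Pre_christmasLargeFamiliesGifts; infer_instance
def pvWitness_christmasLargeFamiliesGifts : List Int × List Int := ([5, 1, 3, 2], [2, 4, 3, 0])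

def Spec_christmasLargeFamiliesGifts (family1 : List Int) (family2 : List Int) (out : Int) : Prop := out = christmasLargeFamiliesGifts_alt family1 family2
instance (family1 : List Int) (family2 : List Int) (out : Int) : Decidable (Spec_christmasLargeFamiliesGifts family1 family2 out) := by unfold Spec_christmasLargeFamiliesGifts; infer_instance

-- ===== CLAIM (what is proved, stated in full; the proofs are below) =====
def Claim_equal_christmasLargeFamiliesGifts : Prop := ∀ (family1 : List Int) (family2 : List Int), Dom_christmasLargeFamiliesGifts family1 family2 → Pre_christmasLargeFamiliesGifts family1 family2 → Spec_christmasLargeFamiliesGifts family1 family2 (christmasLargeFamiliesGifts family1 family2)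

-- ===== LEMMAS AND PROOFS =====

-- A's second sweep, as a step on sign values.
def pvStepA (st : Int × Int) (x : Int) : Int × Int :=
  if x = 1 then (st.1, st.2 + st.1) else if x = -1 then (st.1 - 1, st.2) else st

-- B's loop, as a step on sign values.
def pvStepB (st : Int × Int) (x : Int) : Int × Int :=
  if x = 1 then (st.1 + 1, st.2) else if x = -1 then (st.1, st.2 + st.1) else st

-- One extra accumulated win adds count(-1) of the remaining list to the result.
theorem pvStepB_shift (t : List Int) : ∀ (w r : Int),
    (t.foldl pvStepB (w + 1, r)).2 = (t.foldl pvStepB (w, r + (t.count (-1) : Int))).2 := by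
  induction t with
  | nil => intro w r; simp
  | cons x t ih =>
    intro w r
    by_cases h1 : x = 1
    · subst h1
      simp only [List.foldl_cons, pvStepB, List.count_cons]
      norm_num
      simpa using ih (w + 1) r
    · by_cases h2 : x = -1
      · subst h2
        simp only [List.foldl_cons, pvStepB, List.count_cons]
        norm_num
        rw [show r + ((List.count (-1) t : Int) + 1) + w = (r + (w + 1)) + (List.count (-1) t : Int) by ring,
            ← ih w (r + (w + 1))]
      · simp only [List.foldl_cons, pvStepB, if_neg h1, if_neg h2, List.count_cons]
        rw [ih w r]
        norm_num [h2]

-- Suffix bookkeeping (A) equals prefix bookkeeping (B) when A starts at count(-1).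
theorem pvAB (t : List Int) : ∀ (s : Int),
    (t.foldl pvStepA ((t.count (-1) : Int), s)).2 = (t.foldl pvStepB (0, s)).2 := by
  induction t with
  | nil => intro s; simp
  | cons x t ih =>
    intro s
    by_cases h1 : x = 1
    · subst h1
      have hs := pvStepB_shift t 0 s
      simp only [List.foldl_cons, pvStepA, pvStepB, List.count_cons] at *
      norm_num at *
      rw [ih (s + (t.count (-1) : Int))]
      exact hs.symm
    · by_cases h2 : x = -1
      · subst h2
        simp only [List.foldl_cons, pvStepA, pvStepB, List.count_cons]
        norm_num
        exact ih s
      · simp only [List.foldl_cons, pvStepA, pvStepB, if_neg h1, if_neg h2, List.count_cons]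
        norm_num [h2]
        exact ih s

-- ===== VERDICT (by name: the statement is the Claim_ definition above) =====
theorem christmasLargeFamiliesGifts_spec : Claim_equal_christmasLargeFamiliesGifts := by
  intro family1 family2 _ _
  unfold Spec_christmasLargeFamiliesGifts christmasLargeFamiliesGifts christmasLargeFamiliesGifts_alt
  simp only []
  set n : Int := (family1.length : Int) with hn
  set g : Int → Int := fun i =>
    if PySem.List.pyGetD family1 i 0 = PySem.List.pyGetD family2 i 0 then 0
    else if PySem.List.pyGetD family1 i 0 > PySem.List.pyGetD family2 i 0 then 1 else -1 with hg
  -- A's second sweep reads v[i] = g i for every i in the range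
  rw [PySem.List.foldl_congr_mem (PySem.List.pyRange 0 n 1) _
        (fun st i => pvStepA st (g i)) _ ?_]
  · -- B's loop body is pvStepB of g i
    rw [PySem.List.foldl_congr_mem (PySem.List.pyRange 0 n 1)
          (fun st i =>
            if PySem.List.pyGetD family1 i 0 > PySem.List.pyGetD family2 i 0 then (st.1 + 1, st.2)
            else if PySem.List.pyGetD family1 i 0 < PySem.List.pyGetD family2 i 0 then (st.1, st.2 + st.1)
            else st)
          (fun st i => pvStepB st (g i)) (0, 0) ?_]
    · rw [PySem.List.count_eq]
      conv_lhs => rw [← List.foldl_map (f := g) (g := pvStepA)]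
      conv_rhs => rw [← List.foldl_map (f := g) (g := pvStepB)]
      exact pvAB ((PySem.List.pyRange 0 n 1).map g) 0
    · intro st i hi
      simp only [hg, pvStepB]
      split_ifs <;> first | rfl | omega | (exfalso; omega) | simp_all
  · intro st i hi
    rw [PySem.List.mem_pyRange_one] at hi
    rw [PySem.List.pyGetD_map_pyRange_of_nonneg g n i 0 hi.1 hi.2]
    rfl
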